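-- pv_equiv track=rewrite | github.com/HiveTraum/leetcode | test_palindrome_number.py | get_decomposed_value
-- ===== SOURCE A (Python) =====
-- def get_decomposed_value(x: int, digits_count: int):
--
--     for _ in range(digits_count):
--         if x < 10:
--             yield x
--             break
--         else:
--             yield x % 10
--             x //= 10
-- ===== SOURCE B (Python) =====
-- def get_decomposed_value(x: int, digits_count: int):
--     if digits_count <= 0:
--         return
--     if x < 10:
--         yield x
--         return
--     for ch in str(x)[::-1][:digits_count]:
--         yield int(ch)
-- ===== Notes on version B (the rewrite author's own statement) =====
-- stated objective: idiomatic
-- what changed: Digits are read off the reversed decimal string of x (str(x)[::-1][:digits_count]) instead of a repeated divmod loop; the two guard branches (empty budget, single chunk) become early returns.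
import Mathlib
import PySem

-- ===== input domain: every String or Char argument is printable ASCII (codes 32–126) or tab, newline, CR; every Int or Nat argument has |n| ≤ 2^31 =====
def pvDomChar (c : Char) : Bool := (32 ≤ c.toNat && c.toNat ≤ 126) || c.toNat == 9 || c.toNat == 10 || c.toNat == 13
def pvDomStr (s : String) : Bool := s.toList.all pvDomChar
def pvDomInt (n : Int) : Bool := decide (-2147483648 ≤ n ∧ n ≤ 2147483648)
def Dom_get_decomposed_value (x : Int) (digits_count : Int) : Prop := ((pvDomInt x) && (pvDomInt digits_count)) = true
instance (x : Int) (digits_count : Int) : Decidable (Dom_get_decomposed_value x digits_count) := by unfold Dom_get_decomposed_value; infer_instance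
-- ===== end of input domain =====

-- B reads the digits off the reversed decimal string str(x)[::-1][:digits_count]
-- instead of A's repeated divmod loop (objective: idiomatic).

-- ===== PORT A =====
-- 'for _ in range(digits_count)': the loop body runs at most digits_count.toNat times;
-- 'break' after 'yield x' ends the generator, so the fuel recursion stops there.
def pvALoop : Nat → Int → List Int
  | 0, _ => []
  | n + 1, x =>
    if x < 10 then [x]
    else PySem.Int.mod x 10 :: pvALoop n (PySem.Int.floordiv x 10)

def get_decomposed_value (x : Int) (digits_count : Int) : List Int :=
  pvALoop digits_count.toNat x

-- ===== PORT B =====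
-- str(x)[::-1] is the reverse of the char list of str(x) (PySem.List.slice?_none_none_neg_one);
-- [:digits_count] is PySem.List.slice none (some digits_count); int(ch) on the single decimal
-- digit char ch (the only chars str(x) contains on this branch, where x ≥ 10) is its
-- digit value, ported exactly as ch.toNat - 48.
def get_decomposed_value_alt (x : Int) (digits_count : Int) : List Int :=
  if digits_count ≤ 0 then []
  else if x < 10 then [x]
  else
    (PySem.List.slice (PySem.Int.toChars x).reverse none (some digits_count)).map
      (fun c => (c.toNat : Int) - 48)

-- ===== PRECONDITION & SPEC =====
def Spec_get_decomposed_value (x : Int) (digits_count : Int) (out : List Int) : Prop := out = get_decomposed_value_alt x digits_count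
instance (x : Int) (digits_count : Int) (out : List Int) : Decidable (Spec_get_decomposed_value x digits_count out) := by unfold Spec_get_decomposed_value; infer_instance

-- ===== CLAIM (what is proved, stated in full; the proofs are below) =====
def Claim_equal_get_decomposed_value : Prop := ∀ (x : Int) (digits_count : Int), Dom_get_decomposed_value x digits_count → Spec_get_decomposed_value x digits_count (get_decomposed_value x digits_count)

-- ===== LEMMAS AND PROOFS =====

-- Nat.toDigitsCore with more fuel than the argument ignores the exact fuel value.
theorem pv_toDigitsCore_fuel : ∀ (f₁ f₂ n : Nat) (l : List Char), n < f₁ → n < f₂ →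
    Nat.toDigitsCore 10 f₁ n l = Nat.toDigitsCore 10 f₂ n l := by
  intro f₁
  induction f₁ with
  | zero => intro f₂ n l h1 _; omega
  | succ f ih =>
    intro f₂ n l h1 h2
    cases f₂ with
    | zero => omega
    | succ f₂ =>
      simp only [Nat.toDigitsCore]
      by_cases h : n / 10 = 0
      · simp [h]
      · simp only [h, if_false]
        exact ih f₂ (n / 10) _ (by omega) (by omega)

-- the accumulator of Nat.toDigitsCore is just appended on the right
theorem pv_toDigitsCore_acc : ∀ (f n : Nat) (l : List Char),
    Nat.toDigitsCore 10 f n l = Nat.toDigitsCore 10 f n [] ++ l := by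
  intro f
  induction f with
  | zero => intro n l; simp [Nat.toDigitsCore]
  | succ f ih =>
    intro n l
    simp only [Nat.toDigitsCore]
    by_cases h : n / 10 = 0
    · simp [h]
    · simp only [h, if_false]
      rw [ih (n / 10) [(n % 10).digitChar], ih (n / 10) ((n % 10).digitChar :: l)]
      simp

theorem pv_toDigits_small {n : Nat} (h : n < 10) : Nat.toDigits 10 n = [Nat.digitChar n] := by
  have h0 : n / 10 = 0 := Nat.div_eq_of_lt h
  have h1 : n % 10 = n := Nat.mod_eq_of_lt h
  simp [Nat.toDigits, Nat.toDigitsCore, h0, h1]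

theorem pv_toDigits_step {m : Nat} (h : 10 ≤ m) :
    Nat.toDigits 10 m = Nat.toDigits 10 (m / 10) ++ [Nat.digitChar (m % 10)] := by
  have h0 : m / 10 ≠ 0 := by omega
  conv_lhs => simp only [Nat.toDigits, Nat.toDigitsCore, h0, if_false]
  rw [pv_toDigitsCore_acc m (m / 10) [(m % 10).digitChar],
    pv_toDigitsCore_fuel m (m / 10 + 1) (m / 10) [] (by omega) (by omega)]
  rfl

theorem pv_digitChar_val {d : Nat} (h : d < 10) :
    ((Nat.digitChar d).toNat : Int) - 48 = (d : Int) := by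
  interval_cases d <;> rfl

-- the heart: for x ≥ 10, A's divmod loop reads the reversed decimal digit string
theorem pv_main : ∀ (m k : Nat), 10 ≤ m → 1 ≤ k →
    pvALoop k (m : Int) = ((Nat.toDigits 10 m).reverse.take k).map (fun c => (c.toNat : Int) - 48) := by
  intro m
  induction m using Nat.strong_induction_on with
  | _ m ih =>
    intro k hm hk
    obtain ⟨k', rfl⟩ : ∃ k', k = k' + 1 := ⟨k - 1, by omega⟩
    have hx10 : ¬ ((m : Int) < 10) := by exact_mod_cast not_lt.mpr hm
    have hmod : PySem.Int.mod (m : Int) 10 = ((m % 10 : Nat) : Int) :=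
      PySem.Int.mod_natCast m 10
    have hdiv : PySem.Int.floordiv (m : Int) 10 = ((m / 10 : Nat) : Int) :=
      PySem.Int.floordiv_natCast m 10
    rw [pv_toDigits_step hm]
    simp only [pvALoop, hx10, if_false, hmod, hdiv, List.reverse_append,
      List.reverse_cons, List.reverse_nil, List.nil_append, List.singleton_append,
      List.take_succ_cons, List.map_cons]
    refine congrArg₂ List.cons (pv_digitChar_val (by omega)).symm ?_
    cases k' with
    | zero => simp [pvALoop]
    | succ k'' =>
      by_cases hq : 10 ≤ m / 10
      · exact ih (m / 10) (by omega) (k'' + 1) hq (by omega)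
      · have hq' : ((m / 10 : Nat) : Int) < 10 := by exact_mod_cast not_le.mp hq
        have h1 : pvALoop (k'' + 1) ((m / 10 : Nat) : Int) = [((m / 10 : Nat) : Int)] := by
          simp only [pvALoop, if_pos hq']
        rw [pv_toDigits_small (show m / 10 < 10 by omega), h1, List.reverse_singleton,
          List.take_succ_cons, List.take_nil, List.map_cons, List.map_nil,
          pv_digitChar_val (show m / 10 < 10 by omega)]

-- ===== VERDICT (by name: the statement is the Claim_ definition above) =====
theorem get_decomposed_value_spec : Claim_equal_get_decomposed_value := by
  intro x dc _
  unfold Spec_get_decomposed_value get_decomposed_value get_decomposed_value_alt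
  by_cases hdc : dc ≤ 0
  · have : dc.toNat = 0 := by omega
    simp [this, hdc, pvALoop]
  · have hpos : 0 < dc := by omega
    obtain ⟨k, hk⟩ : ∃ k, dc.toNat = k + 1 := ⟨dc.toNat - 1, by omega⟩
    by_cases hx : x < 10
    · simp [hdc, hx, hk, pvALoop]
    · have hx0 : 0 ≤ x := by omega
      have hm : 10 ≤ x.toNat := by omega
      have hxm : ((x.toNat : Nat) : Int) = x := Int.toNat_of_nonneg hx0
      rw [PySem.List.slice_to _ (le_of_lt hpos)]
      simp only [hdc, hx, if_false]
      have := pv_main x.toNat dc.toNat hm (by omega)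
      rw [hxm] at this
      rw [this]
      simp [PySem.Int.toChars, show ¬ (x < 0) by omega]
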